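-- pv_equiv track=rewrite | github.com/redoffman/costlysiya | csprogramming/NumCode.py | code_to_score
-- ===== SOURCE A (Python) =====
-- def code_to_score ( str ):
--
--     sum_point = 0 ;
--     add_point = 0 ;
--     pre_ch =""
--
--     for ch in str :
--         if ch == "n":
--             add_point = 0
--         elif pre_ch == ch :
--             add_point = add_point +1
--             sum_point = sum_point + add_point
--         else:
--             add_point = 1
--             sum_point = sum_point + add_point
--
--         pre_ch = ch
--
--     return sum_point
-- ===== SOURCE B (Python) =====
-- def code_to_score(str):
--     total = 0
--     i = 0
--     n = len(str)
--     while i < n: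
--         c = str[i]
--         j = i + 1
--         while j < n and str[j] == c:
--             j += 1
--         if c != "n":
--             L = j - i
--             total += L * (L + 1) // 2
--         i = j
--     return total
-- ===== Notes on version B (the rewrite author's own statement) =====
-- stated objective: alternative
-- what changed: B scans the string run by run (two-index run detection) and adds the closed-form triangular number L*(L+1)//2 per maximal run of a non-'n' character, instead of A's per-character incremental streak accumulator.
import Mathlib
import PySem

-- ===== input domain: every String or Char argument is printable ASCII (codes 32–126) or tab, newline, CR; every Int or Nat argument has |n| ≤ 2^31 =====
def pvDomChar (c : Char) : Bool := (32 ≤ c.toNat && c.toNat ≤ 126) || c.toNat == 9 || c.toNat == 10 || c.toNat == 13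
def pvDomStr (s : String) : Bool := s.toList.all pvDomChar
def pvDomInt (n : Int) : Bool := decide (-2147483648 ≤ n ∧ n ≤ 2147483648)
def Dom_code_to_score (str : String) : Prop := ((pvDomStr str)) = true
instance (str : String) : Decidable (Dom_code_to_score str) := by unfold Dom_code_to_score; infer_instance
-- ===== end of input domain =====

-- B replaces A's per-character streak accumulator by a run-by-run scan adding the
-- closed-form triangular number L*(L+1)//2 per maximal run of a non-'n' character
-- (objective: alternative algorithm, same O(n) cost).

-- ===== PORT A =====
-- state (sum_point, add_point, pre_ch); Python's pre_ch = "" is 'none' (never equal to a char)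
def pvStepA (st : Int × Int × Option Char) (ch : Char) : Int × Int × Option Char :=
  if ch = 'n' then (st.1, 0, some ch)
  else if st.2.2 = some ch then (st.1 + (st.2.1 + 1), st.2.1 + 1, some ch)
  else (st.1 + 1, 1, some ch)

def code_to_score (str : String) : Int :=
  (str.toList.foldl pvStepA (0, 0, none)).1

-- ===== PORT B =====
-- inner while loop of Source B: length of the run of c at the front of the list
def pvRunLen (c : Char) : List Char → Nat
  | [] => 0
  | x :: xs => if x = c then pvRunLen c xs + 1 else 0

-- outer while loop of Source B: consume one maximal run per step
def pvGo : List Char → Int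
  | [] => 0
  | c :: rest =>
      let k := pvRunLen c rest
      let L : Int := (k : Int) + 1
      (if c = 'n' then 0 else PySem.Int.floordiv (L * (L + 1)) 2) + pvGo (rest.drop k)
  termination_by l => l.length
  decreasing_by simp [List.length_drop]

def code_to_score_alt (str : String) : Int := pvGo str.toList

-- ===== PRECONDITION & SPEC =====
def Spec_code_to_score (str : String) (out : Int) : Prop := out = code_to_score_alt str
instance (str : String) (out : Int) : Decidable (Spec_code_to_score str out) := by unfold Spec_code_to_score; infer_instance

-- ===== CLAIM (what is proved, stated in full; the proofs are below) =====
def Claim_equal_code_to_score : Prop := ∀ (str : String), Dom_code_to_score str → Spec_code_to_score str (code_to_score str)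

-- ===== LEMMAS AND PROOFS =====

theorem pvGo_nil : pvGo [] = 0 := by simp [pvGo]

theorem pvGo_cons (c : Char) (rest : List Char) : pvGo (c :: rest) =
    (if c = 'n' then 0
     else PySem.Int.floordiv (((pvRunLen c rest : Int) + 1) * (((pvRunLen c rest : Int) + 1) + 1)) 2)
      + pvGo (rest.drop (pvRunLen c rest)) := by
  rw [pvGo]

-- triangular numbers tri n = 1 + 2 + … + n
def pvTri : Nat → Int
  | 0 => 0
  | n + 1 => pvTri n + (n + 1)

theorem pvTri_double (n : Nat) : pvTri n * 2 = (n : Int) * (n + 1) := by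
  induction n with
  | zero => simp [pvTri]
  | succ m ih => simp only [pvTri]; push_cast; push_cast at ih; ring_nf; ring_nf at ih; omega

theorem pvTri_floordiv (n : Nat) :
    PySem.Int.floordiv ((n : Int) * ((n : Int) + 1)) 2 = pvTri n := by
  rw [PySem.Int.floordiv_eq_iff_of_pos (by norm_num)]
  have h := pvTri_double n
  constructor
  · omega
  · omega

theorem head_drop_run (c : Char) (l : List Char) (x : Char) (xs : List Char)
    (h : l.drop (pvRunLen c l) = x :: xs) : x ≠ c := by
  induction l generalizing x xs with
  | nil => simp [pvRunLen] at h
  | cons y ys ih =>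
      by_cases hy : y = c
      · simp only [pvRunLen, if_pos hy, List.drop_succ_cons] at h
        exact ih x xs h
      · simp only [pvRunLen, if_neg hy, List.drop_zero] at h
        cases h; exact hy

-- folding A's step through a run of c (c ≠ 'n') starting with pre_ch = c
theorem foldA_run (l : List Char) (c : Char) (hc : c ≠ 'n') :
    ∀ (s a : Int), List.foldl pvStepA (s, a, some c) l =
      List.foldl pvStepA
        (s + (pvRunLen c l : Int) * a + pvTri (pvRunLen c l), a + (pvRunLen c l : Int), some c)
        (l.drop (pvRunLen c l)) := by
  induction l with
  | nil => intro s a; simp [pvRunLen, pvTri]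
  | cons x xs ih =>
      intro s a
      by_cases hx : x = c
      · subst hx
        have hk : pvRunLen x (x :: xs) = pvRunLen x xs + 1 := by simp [pvRunLen]
        rw [hk, List.drop_succ_cons, List.foldl_cons]
        rw [show pvStepA (s, a, some x) x = (s + (a + 1), a + 1, some x) by
          simp [pvStepA, hc]]
        rw [ih (s + (a + 1)) (a + 1)]
        have h1 : s + (a + 1) + (pvRunLen x xs : Int) * (a + 1) + pvTri (pvRunLen x xs)
            = s + ((pvRunLen x xs + 1 : Nat) : Int) * a + pvTri (pvRunLen x xs + 1) := by
          simp only [pvTri]; push_cast; ring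
        have h2 : a + 1 + ((pvRunLen x xs : Nat) : Int) = a + ((pvRunLen x xs + 1 : Nat) : Int) := by
          push_cast; ring
        rw [h1, h2]
      · simp [pvRunLen, hx, pvTri]

-- folding A's step through a run of 'n' starting with add_point = 0
theorem foldA_nrun (l : List Char) :
    ∀ (s : Int), List.foldl pvStepA (s, 0, some 'n') l =
      List.foldl pvStepA (s, 0, some 'n') (l.drop (pvRunLen 'n' l)) := by
  induction l with
  | nil => intro s; simp [pvRunLen]
  | cons x xs ih =>
      intro s
      by_cases hx : x = 'n'
      · subst hx
        simp only [pvRunLen, if_pos rfl, List.drop_succ_cons, List.foldl_cons]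
        rw [show pvStepA (s, 0, some 'n') 'n' = (s, 0, some 'n') by simp [pvStepA]]
        exact ih s
      · simp [pvRunLen, hx]

theorem main_lemma : ∀ (n : Nat) (l : List Char), l.length ≤ n →
    ∀ (s a : Int) (p : Option Char),
    (∀ x xs, l = x :: xs → p ≠ some x) →
    (List.foldl pvStepA (s, a, p) l).1 = s + pvGo l := by
  intro n
  induction n with
  | zero =>
      intro l hl s a p _
      have : l = [] := List.eq_nil_of_length_eq_zero (Nat.le_zero.mp hl)
      subst this; simp [pvGo_nil]
  | succ m ih =>
      intro l hl s a p hp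
      cases l with
      | nil => simp [pvGo_nil]
      | cons c rest =>
          simp only [List.foldl_cons]
          by_cases hc : c = 'n'
          · subst hc
            rw [show pvStepA (s, a, p) 'n' = (s, 0, some 'n') by simp [pvStepA]]
            rw [foldA_nrun rest s]
            have hlen : (rest.drop (pvRunLen 'n' rest)).length ≤ m := by
              simp only [List.length_drop]
              simp only [List.length_cons] at hl; omega
            rw [ih _ hlen s 0 (some 'n')
              (fun x xs h => by
                have := head_drop_run 'n' rest x xs h
                exact fun he => this (Option.some.inj he).symm)]
            rw [show pvGo ('n' :: rest) =
                0 + pvGo (rest.drop (pvRunLen 'n' rest)) by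
              rw [pvGo_cons]; simp]
            ring
          · rw [show pvStepA (s, a, p) c = (s + 1, 1, some c) by
              simp only [pvStepA, if_neg hc]
              rw [if_neg (hp c rest rfl)]]
            rw [foldA_run rest c hc (s + 1) 1]
            set k := pvRunLen c rest with hk
            have hlen : (rest.drop k).length ≤ m := by
              simp only [List.length_drop]
              simp only [List.length_cons] at hl; omega
            rw [ih _ hlen _ _ (some c)
              (fun x xs h => by
                have := head_drop_run c rest x xs h
                exact fun he => this (Option.some.inj he).symm)]
            rw [show pvGo (c :: rest) =
                PySem.Int.floordiv (((k : Int) + 1) * (((k : Int) + 1) + 1)) 2 +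
                  pvGo (rest.drop k) by
              rw [pvGo_cons]; simp [hc, ← hk]]
            have htri : PySem.Int.floordiv (((k : Int) + 1) * (((k : Int) + 1) + 1)) 2
                = pvTri (k + 1) := by
              have := pvTri_floordiv (k + 1)
              push_cast at this ⊢
              convert this using 2 <;> ring
            rw [htri]
            simp only [pvTri]
            push_cast
            ring

-- ===== VERDICT (by name: the statement is the Claim_ definition above) =====
theorem code_to_score_spec : Claim_equal_code_to_score := by
  intro str _
  unfold Spec_code_to_score code_to_score code_to_score_alt
  have h := main_lemma str.toList.length str.toList (le_refl _) 0 0 none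
    (fun x xs _ => by simp)
  rw [h]; ring
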